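-- pv_equiv track=rewrite | github.com/andyliszewski/grounding-ai | grounding/formatter.py | _compute_heading_stacks
-- ===== SOURCE A (Python) =====
-- from typing import Any, List, Mapping, MutableMapping, Optional, Sequence, Tuple
--
-- def _compute_heading_stacks(
--     per_element_heading: Sequence[Optional[Tuple[int, str]]],
-- ) -> List[Tuple[str, ...]]:
--     """Compute the heading stack at each element position.
--
--     Args:
--         per_element_heading: One entry per kept element. ``None`` if the
--             element is a body block; ``(level, text)`` if it is a heading.
--
--     Returns:
--         A list the same length as input, with the heading stack tuple for
--         each element. Heading elements include themselves in their stack.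
--     """
--     stacks: List[Tuple[str, ...]] = []
--     current: List[Tuple[int, str]] = []
--     for item in per_element_heading:
--         if item is not None:
--             level, text = item
--             while current and current[-1][0] >= level:
--                 current.pop()
--             current.append((level, text))
--         stacks.append(tuple(t for _, t in current))
--     return stacks
-- ===== SOURCE B (Python) =====
-- from typing import List, Optional, Sequence, Tuple
--
-- def _compute_heading_stacks(
--     per_element_heading: Sequence[Optional[Tuple[int, str]]],
-- ) -> List[Tuple[str, ...]]:
--     stacks: List[Tuple[str, ...]] = []
--     d = {}
--     for item in per_element_heading:
--         if item is not None:
--             level, text = item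
--             for k in [k for k in d if k >= level]:
--                 del d[k]
--             d[level] = text
--         stacks.append(tuple(d[k] for k in sorted(d)))
--     return stacks
-- ===== Notes on version B (the rewrite author's own statement) =====
-- stated objective: alternative
-- what changed: Replaces A's explicit stack with pop-while/append by a level->text dict: delete every key >= level, set d[level]=text, and emit each snapshot by reading the dict through sorted keys instead of stack order.
import Mathlib
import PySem

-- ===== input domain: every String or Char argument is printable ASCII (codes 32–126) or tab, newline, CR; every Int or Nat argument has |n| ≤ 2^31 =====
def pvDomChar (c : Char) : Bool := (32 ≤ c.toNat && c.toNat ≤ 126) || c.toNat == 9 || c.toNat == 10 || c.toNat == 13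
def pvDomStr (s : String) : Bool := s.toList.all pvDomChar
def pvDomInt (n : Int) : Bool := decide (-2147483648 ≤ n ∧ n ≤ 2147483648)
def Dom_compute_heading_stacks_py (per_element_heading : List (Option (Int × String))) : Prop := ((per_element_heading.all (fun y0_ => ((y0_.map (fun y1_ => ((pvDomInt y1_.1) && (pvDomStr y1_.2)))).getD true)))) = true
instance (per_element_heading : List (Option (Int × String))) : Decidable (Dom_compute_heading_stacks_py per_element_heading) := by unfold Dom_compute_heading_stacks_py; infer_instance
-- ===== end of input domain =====

-- B replaces A's explicit stack (pop-while then append) by a level→text map: delete every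
-- key ≥ level, set d[level], and read the snapshot through sorted keys (objective: alternative).


-- ===== PORT A =====
-- while current and current[-1][0] >= level: current.pop()
def pvPopWhile (current : List (Int × String)) (level : Int) : List (Int × String) :=
  match h : current.getLast? with
  | none => current
  | some last =>
    if level ≤ last.1 then pvPopWhile current.dropLast level else current
termination_by current.length
decreasing_by
  have hne : current ≠ [] := by intro e; subst e; simp at h
  simpa [List.length_dropLast] using Nat.sub_lt (List.length_pos_iff.mpr hne) Nat.one_pos

def compute_heading_stacks_py (per_element_heading : List (Option (Int × String))) : List (List String) :=
  (per_element_heading.foldl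
    (fun (acc : List (List String) × List (Int × String)) item =>
      let current :=
        match item with
        | none => acc.2
        | some (level, text) => pvPopWhile acc.2 level ++ [(level, text)]
      (acc.1 ++ [current.map (fun t => t.2)], current))
    ([], [])).1

-- ===== PORT B =====
-- for k in [k for k in d if k >= level]: del d[k];  d[level] = text
def pvBStep (d : PySem.Dict Int String) (level : Int) (text : String) : PySem.Dict Int String :=
  ((d.keys.filter (fun k => decide (level ≤ k))).foldl (fun d k => d.erase k) d).insert level text

-- tuple(d[k] for k in sorted(d));  d[k] always hits since k ∈ d, so .getD "" is a pure totality guard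
def pvSnapshot (d : PySem.Dict Int String) : List String :=
  (PySem.List.sorted d.keys (fun k => k) false).map (fun k => (d.get? k).getD "")

def compute_heading_stacks_py_alt (per_element_heading : List (Option (Int × String))) : List (List String) :=
  (per_element_heading.foldl
    (fun (acc : List (List String) × PySem.Dict Int String) item =>
      let d :=
        match item with
        | none => acc.2
        | some (level, text) => pvBStep acc.2 level text
      (acc.1 ++ [pvSnapshot d], d))
    ([], PySem.Dict.empty)).1

-- ===== PRECONDITION & SPEC =====
def Spec_compute_heading_stacks_py (per_element_heading : List (Option (Int × String))) (out : List (List String)) : Prop := out = compute_heading_stacks_py_alt per_element_heading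
instance (per_element_heading : List (Option (Int × String))) (out : List (List String)) : Decidable (Spec_compute_heading_stacks_py per_element_heading out) := by unfold Spec_compute_heading_stacks_py; infer_instance

-- ===== CLAIM (what is proved, stated in full; the proofs are below) =====
def Claim_equal_compute_heading_stacks_py : Prop := ∀ (per_element_heading : List (Option (Int × String))), Dom_compute_heading_stacks_py per_element_heading → Spec_compute_heading_stacks_py per_element_heading (compute_heading_stacks_py per_element_heading)

-- ===== LEMMAS AND PROOFS =====

-- strictly increasing heading levels: the invariant of A's stack
def pvInc (current : List (Int × String)) : Prop :=
  (current.map Prod.fst).Pairwise (· < ·)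

-- A's pop-while on a strictly increasing stack keeps exactly the entries strictly below `level`
theorem pvPopWhile_eq_filter (current : List (Int × String)) (level : Int)
    (h : pvInc current) :
    pvPopWhile current level = current.filter (fun p => decide (p.1 < level)) := by
  induction current using List.reverseRecOn with
  | nil => simp [pvPopWhile]
  | append_singleton init last ih =>
    have hinc : pvInc init :=
      (List.pairwise_append.mp (by simpa [pvInc] using h)).1
    rw [pvPopWhile]
    split
    · rename_i heq
      rw [List.getLast?_concat] at heq
      exact absurd heq (by simp)
    · rename_i last' heq
      rw [List.getLast?_concat] at heq
      obtain rfl : last = last' := by injection heq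
      rw [List.dropLast_concat]
      by_cases hl : level ≤ last.1
      · rw [if_pos hl, ih hinc]
        have hlast : (fun p : Int × String => decide (p.1 < level)) last = false := by
          simp; omega
        simp [List.filter_append, hlast]
      · rw [if_neg hl]
        have hall : ∀ p ∈ init ++ [last], (fun p : Int × String => decide (p.1 < level)) p = true := by
          intro p hp
          rcases List.mem_append.mp hp with hp | hp
          · have hcross := (List.pairwise_append.mp (by simpa [pvInc] using h)).2.2
            have : p.1 < last.1 := hcross p.1 (List.mem_map_of_mem hp) last.1 (by simp)
            simp; omega
          · simp at hp; subst hp; simp; omega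
        exact (List.filter_eq_self.mpr hall).symm

-- the erase loop filters the items list
theorem pvEraseFold (ks : List Int) (l : List (Int × String)) :
    (ks.foldl (fun d k => d.erase k) (PySem.Dict.mk l)) =
      PySem.Dict.mk (l.filter (fun p => decide (p.1 ∉ ks))) := by
  induction ks generalizing l with
  | nil => simp
  | cons k ks ih =>
    rw [List.foldl_cons,
      show (PySem.Dict.mk l).erase k = PySem.Dict.mk (l.filter (fun p => !p.1 == k)) from rfl,
      ih]
    congr 1
    rw [List.filter_filter]
    apply List.filter_congr
    intro p _
    by_cases h1 : p.1 = k <;> by_cases h2 : p.1 ∈ ks <;> simp [h1, h2]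

-- B's whole heading step on the dict mirrors A's stack step
theorem pvStep_eq (current : List (Int × String)) (level : Int) (text : String)
    (h : pvInc current) :
    pvBStep (PySem.Dict.mk current) level text =
      PySem.Dict.mk (pvPopWhile current level ++ [(level, text)]) := by
  rw [pvPopWhile_eq_filter current level h]
  unfold pvBStep
  have hkeys : (PySem.Dict.mk current).keys = current.map Prod.fst := rfl
  rw [hkeys, pvEraseFold]
  have hfil : current.filter
      (fun p => decide (p.1 ∉ (current.map Prod.fst).filter (fun k => decide (level ≤ k)))) =
      current.filter (fun p => decide (p.1 < level)) := by
    apply List.filter_congr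
    intro p hp
    have hmem : p.1 ∈ current.map Prod.fst := List.mem_map_of_mem hp
    simp only [decide_eq_decide, List.mem_filter]
    constructor
    · intro hc
      by_contra hlt
      exact hc ⟨hmem, by simp; omega⟩
    · intro hlt hc
      have := hc.2; simp at this; omega
  rw [hfil]
  have hnc : (PySem.Dict.mk (current.filter (fun p => decide (p.1 < level)))).contains level = false := by
    rw [show (PySem.Dict.mk (current.filter (fun p => decide (p.1 < level)))).contains level =
      (current.filter (fun p => decide (p.1 < level))).any (fun p => p.1 == level) from rfl,
      List.any_eq_false]
    intro p hp
    have := (List.mem_filter.mp hp).2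
    simp at this ⊢
    omega
  apply PySem.Dict.ext
  rw [PySem.Dict.items_insert_of_not_contains _ text hnc]

theorem pvInc_step (current : List (Int × String)) (level : Int) (text : String)
    (h : pvInc current) :
    pvInc (pvPopWhile current level ++ [(level, text)]) := by
  rw [pvPopWhile_eq_filter current level h]
  unfold pvInc
  rw [List.map_append, List.pairwise_append]
  refine ⟨?_, by simp, ?_⟩
  · have hsub : List.Sublist ((current.filter (fun p => decide (p.1 < level))).map Prod.fst)
        (current.map Prod.fst) := (List.filter_sublist).map Prod.fst
    exact h.sublist hsub
  · intro a ha b hb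
    simp only [List.map_cons, List.map_nil, List.mem_singleton] at hb
    subst hb
    rcases List.mem_map.mp ha with ⟨p, hp, rfl⟩
    have := (List.mem_filter.mp hp).2
    simpa using this

theorem pvSnapshot_eq (current : List (Int × String)) (h : pvInc current) :
    pvSnapshot (PySem.Dict.mk current) = current.map (fun t => t.2) := by
  unfold pvSnapshot
  have hkeys : (PySem.Dict.mk current).keys = current.map Prod.fst := rfl
  have hpw : ((PySem.Dict.mk current).keys).Pairwise (· < ·) := by rw [hkeys]; exact h
  have hnd : ((PySem.Dict.mk current).keys).Nodup := hpw.nodup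
  rw [PySem.List.sorted_eq_of_perm_of_pairwise_lt _ _ _ (List.Perm.refl _) hpw]
  calc ((PySem.Dict.mk current).keys).map (fun k => ((PySem.Dict.mk current).get? k).getD "")
      = ((PySem.Dict.mk current).keys).map (fun k => (PySem.Dict.mk current).getD k "") := by
        apply List.map_congr_left; intro k _; rw [PySem.Dict.getD_eq_get?_getD]
    _ = (PySem.Dict.mk current).values :=
        (PySem.Dict.values_eq_map_keys (PySem.Dict.mk current) hnd "").symm
    _ = current.map (fun t => t.2) := by simp [PySem.Dict.values_mk]

theorem pvMain (xs : List (Option (Int × String))) (acc : List (List String))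
    (current : List (Int × String)) (h : pvInc current) :
    (xs.foldl
      (fun (acc : List (List String) × List (Int × String)) item =>
        let current :=
          match item with
          | none => acc.2
          | some (level, text) => pvPopWhile acc.2 level ++ [(level, text)]
        (acc.1 ++ [current.map (fun t => t.2)], current)) (acc, current)).1 =
    (xs.foldl
      (fun (acc : List (List String) × PySem.Dict Int String) item =>
        let d :=
          match item with
          | none => acc.2
          | some (level, text) => pvBStep acc.2 level text
        (acc.1 ++ [pvSnapshot d], d)) (acc, PySem.Dict.mk current)).1 := by
  induction xs generalizing acc current with
  | nil => rfl
  | cons x xs ih =>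
    cases x with
    | none =>
      simp only [List.foldl_cons]
      rw [pvSnapshot_eq current h]
      exact ih _ _ h
    | some lt =>
      obtain ⟨level, text⟩ := lt
      simp only [List.foldl_cons]
      rw [pvStep_eq current level text h, pvSnapshot_eq _ (pvInc_step current level text h)]
      exact ih _ _ (pvInc_step current level text h)

-- ===== VERDICT (by name: the statement is the Claim_ definition above) =====
theorem compute_heading_stacks_py_spec : Claim_equal_compute_heading_stacks_py := by
  intro xs _
  unfold Spec_compute_heading_stacks_py compute_heading_stacks_py compute_heading_stacks_py_alt
  exact pvMain xs [] [] (by simp [pvInc])
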